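-- pv_equiv track=rewrite | github.com/fuhao23/BSTS-Net | utils/DataUtils.py | getSegByDirs
-- ===== SOURCE A (Python) =====
-- def getSegByDirs(data):
--     res=list()
--     cur_dir=data[0]
--     cur_start=0
--     for d_index,d_item in enumerate(data):
--         if d_item!=cur_dir:
--             res.append([cur_start,d_index])
--             cur_start=d_index
--             cur_dir=d_item
--     res.append([cur_start,len(data)])
--     return res
-- ===== SOURCE B (Python) =====
-- def getSegByDirs(data):
--     changes = [i for i, (x, y) in enumerate(zip(data, data[1:]), 1) if x != y]
--     bounds = [0] + changes + [len(data)]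
--     return [[a, b] for a, b in zip(bounds, bounds[1:])]
-- ===== Notes on version B (the rewrite author's own statement) =====
-- stated objective: alternative
-- what changed: Replaces A's stateful single scan (tracking current direction and segment start) with a two-phase boundary computation: collect all change indices from consecutive pairs, then zip adjacent boundaries into segments.
import Mathlib
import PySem

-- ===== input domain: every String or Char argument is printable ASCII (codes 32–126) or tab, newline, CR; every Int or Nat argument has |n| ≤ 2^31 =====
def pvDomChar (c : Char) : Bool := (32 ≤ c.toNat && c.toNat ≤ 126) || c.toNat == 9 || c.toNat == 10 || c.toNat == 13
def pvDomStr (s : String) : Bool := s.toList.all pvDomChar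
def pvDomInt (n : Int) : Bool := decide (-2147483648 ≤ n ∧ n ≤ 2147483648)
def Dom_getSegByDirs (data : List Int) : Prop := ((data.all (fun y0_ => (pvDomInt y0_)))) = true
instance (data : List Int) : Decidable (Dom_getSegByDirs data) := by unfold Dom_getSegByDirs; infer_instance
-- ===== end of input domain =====

-- B replaces A's stateful single scan with a two-phase boundary computation (change
-- indices, then zip adjacent boundaries); equal return value on all nonempty inputs.

-- ===== PORT A =====
def getSegByDirs (data : List Int) : List (List Int) :=
  let cur0 : Int := (PySem.List.pyGet? data 0).getD 0   -- data[0]; Pre_ excludes the IndexError case data = []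
  let st := (PySem.List.enumerate data 0).foldl
    (fun (st : List (List Int) × Int × Int) p =>
      if p.2 ≠ st.2.1 then (st.1 ++ [[st.2.2, p.1]], p.2, p.1) else st)
    ([], cur0, 0)
  st.1 ++ [[st.2.2, (data.length : Int)]]

-- ===== PORT B =====
def getSegByDirs_alt (data : List Int) : List (List Int) :=
  let changes := ((PySem.List.enumerate (data.zip data.tail) 1).filter
      (fun p => p.2.1 ≠ p.2.2)).map (·.1)
  let bounds := [0] ++ changes ++ [(data.length : Int)]
  (bounds.zip bounds.tail).map (fun p => [p.1, p.2])

-- ===== PRECONDITION & SPEC =====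
-- Pre_ excludes only the empty list, on which A raises IndexError (data[0]).
def Pre_getSegByDirs (data : List Int) : Prop := data ≠ []
instance (data : List Int) : Decidable (Pre_getSegByDirs data) := by unfold Pre_getSegByDirs; infer_instance
def pvWitness_getSegByDirs : List Int := [1, 1, -1]

def Spec_getSegByDirs (data : List Int) (out : List (List Int)) : Prop := out = getSegByDirs_alt data
instance (data : List Int) (out : List (List Int)) : Decidable (Spec_getSegByDirs data out) := by unfold Spec_getSegByDirs; infer_instance

-- ===== CLAIM (what is proved, stated in full; the proofs are below) =====
def Claim_equal_getSegByDirs : Prop := ∀ (data : List Int), Dom_getSegByDirs data → Pre_getSegByDirs data → Spec_getSegByDirs data (getSegByDirs data)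

-- ===== LEMMAS AND PROOFS =====

-- Reference recursion: segments of the suffix `xs` starting at index `i`,
-- with current run value `dir` and current run start `s` (final end not yet appended).
def segsFrom (dir s i : Int) : List Int → List (List Int)
  | [] => [[s, i]]
  | x :: xs => if x ≠ dir then [s, i] :: segsFrom x i (i+1) xs else segsFrom dir s (i+1) xs

-- Reference recursion for B's change indices: `prev` is the element at index i-1.
def chgs (prev i : Int) : List Int → List Int
  | [] => []
  | y :: ys => if y ≠ prev then i :: chgs y (i+1) ys else chgs y (i+1) ys

def zipSegs (l : List Int) : List (List Int) := (l.zip l.tail).map (fun p => [p.1, p.2])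

theorem zipSegs_cons (a b : Int) (l : List Int) :
    zipSegs (a :: b :: l) = [a, b] :: zipSegs (b :: l) := by
  simp [zipSegs]

theorem foldA (xs : List Int) : ∀ (res : List (List Int)) (dir s i : Int),
    (((PySem.List.enumerate xs i).foldl
      (fun (st : List (List Int) × Int × Int) p =>
        if p.2 ≠ st.2.1 then (st.1 ++ [[st.2.2, p.1]], p.2, p.1) else st)
      (res, dir, s)).1 ++
      [[((PySem.List.enumerate xs i).foldl
        (fun (st : List (List Int) × Int × Int) p =>
          if p.2 ≠ st.2.1 then (st.1 ++ [[st.2.2, p.1]], p.2, p.1) else st)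
        (res, dir, s)).2.2, i + (xs.length : Int)]]) = res ++ segsFrom dir s i xs := by
  induction xs with
  | nil => intro res dir s i; simp [PySem.List.enumerate_nil, segsFrom]
  | cons x xs ih =>
    intro res dir s i
    rw [PySem.List.enumerate_cons]
    simp only [List.foldl_cons, segsFrom]
    have hlen : (((x :: xs).length : Int)) = (xs.length : Int) + 1 := by simp
    rw [hlen, show i + ((xs.length : Int) + 1) = (i + 1) + (xs.length : Int) from by ring]
    by_cases h : x = dir
    · rw [if_neg (fun hn => hn h), if_neg (fun hn => hn h)]
      exact ih res dir s (i + 1)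
    · rw [if_pos h, if_pos h]
      rw [ih (res ++ [[s, i]]) x i (i + 1)]
      simp

theorem chgsB (xs : List Int) : ∀ (prev i : Int),
    ((PySem.List.enumerate ((prev :: xs).zip xs) i).filter
      (fun p => p.2.1 ≠ p.2.2)).map (·.1) = chgs prev i xs := by
  induction xs with
  | nil => intro prev i; simp [PySem.List.enumerate_nil, chgs]
  | cons y ys ih =>
    intro prev i
    simp only [List.zip_cons_cons, PySem.List.enumerate_cons, List.filter_cons, chgs]
    by_cases h : y = prev
    · subst h
      simpa using ih y (i+1)
    · have h2 : prev ≠ y := Ne.symm h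
      simp only [ne_eq, h2, not_false_eq_true, decide_true, if_pos, h, List.map_cons]
      rw [ih y (i+1)]

theorem segs_eq_zip (xs : List Int) : ∀ (dir s i : Int),
    segsFrom dir s i xs = zipSegs (s :: chgs dir i xs ++ [i + (xs.length : Int)]) := by
  induction xs with
  | nil => intro dir s i; simp [segsFrom, chgs, zipSegs]
  | cons x xs ih =>
    intro dir s i
    simp only [segsFrom, chgs, List.length_cons]
    have harith : i + ((xs.length : Int) + 1) = (i + 1) + (xs.length : Int) := by ring
    push_cast
    rw [harith]
    by_cases h : x = dir
    · simp only [h, ne_eq, not_true_eq_false, if_false]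
      exact ih dir s (i+1)
    · simp only [ne_eq, h, not_false_eq_true, if_true]
      have : (s :: (i :: chgs x (i+1) xs) ++ [(i+1) + (xs.length : Int)]) =
          s :: i :: (chgs x (i+1) xs ++ [(i+1) + (xs.length : Int)]) := by simp
      rw [this, zipSegs_cons]
      rw [ih x i (i+1)]
      simp

-- ===== VERDICT (by name: the statement is the Claim_ definition above) =====
theorem getSegByDirs_spec : Claim_equal_getSegByDirs := by
  intro data _ hpre
  unfold Spec_getSegByDirs getSegByDirs getSegByDirs_alt
  obtain ⟨d, tl, rfl⟩ : ∃ d tl, data = d :: tl := by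
    cases data with
    | nil => exact absurd rfl hpre
    | cons d tl => exact ⟨d, tl, rfl⟩
  simp only []
  have hget : (PySem.List.pyGet? (d :: tl) 0).getD 0 = d := by
    simp [PySem.List.pyGet?, PySem.List.pyIdx?]
  rw [hget]
  have hA := foldA (d :: tl) [] d 0 0
  simp only [List.nil_append, zero_add] at hA
  rw [hA]
  have hseg : segsFrom d 0 0 (d :: tl) = segsFrom d 0 1 tl := by
    simp [segsFrom]
  rw [hseg, segs_eq_zip]
  have htl : (d :: tl).zip (d :: tl).tail = (d :: tl).zip tl := by simp
  rw [htl, chgsB tl d 1]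
  simp only [zipSegs, List.length_cons, List.singleton_append]
  push_cast
  rw [show ((tl.length : Int) + 1) = 1 + (tl.length : Int) from by ring]
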